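-- pv_equiv track=rewrite | github.com/Lokesh-102214/FreeMorph_sdxl | freemorph_xl_gpu_optimized.py | build_fourier_thresholds
-- ===== SOURCE A (Python) =====
-- def build_fourier_thresholds(
--     interpolation_size: int,
--     latent_h: int,
--     latent_w: int,
-- ) -> list[int]:
--     """Build per-frame Fourier-filter thresholds."""
--     lat_dim = min(latent_h, latent_w)
--     t_edge = int(lat_dim * 0.500)
--     t_near = int(lat_dim * 0.458)
--     t_center = int(lat_dim * 0.438)
--
--     thresholds = [0] * interpolation_size
--     for k in range(1, interpolation_size - 1):
--         dist_from_edge = min(k - 1, interpolation_size - 2 - k)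
--         if dist_from_edge == 0:
--             thresholds[k] = t_edge
--         elif dist_from_edge == 1:
--             thresholds[k] = t_near
--         else:
--             thresholds[k] = t_center
--     return thresholds
-- ===== SOURCE B (Python) =====
-- def build_fourier_thresholds(
--     interpolation_size: int,
--     latent_h: int,
--     latent_w: int,
-- ) -> list[int]:
--     """Block-fill version: fill the interior with t_center, then overwrite the
--     near band and finally the edge band (edge wins over near wins over center)."""
--     lat_dim = min(latent_h, latent_w)
--     t_edge = int(lat_dim * 0.500)
--     t_near = int(lat_dim * 0.458)
--     t_center = int(lat_dim * 0.438)
--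
--     n = interpolation_size
--     thresholds = [0] * max(n, 0)
--     thresholds[1:n - 1] = [t_center] * max(n - 2, 0)
--     for i, t in ((2, t_near), (n - 3, t_near), (1, t_edge), (n - 2, t_edge)):
--         if 1 <= i <= n - 2:
--             thresholds[i] = t
--     return thresholds
-- ===== Notes on version B (the rewrite author's own statement) =====
-- stated objective: faster
-- what changed: Replaces A's per-index Python loop computing dist_from_edge with a block fill: allocate zeros, slice-assign the whole interior to t_center in one C-level operation, then overwrite the near band (indices 2 and n-3) and the edge band (indices 1 and n-2) with four range-guarded point writes, edge winning over near winning over center.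
import Mathlib
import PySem

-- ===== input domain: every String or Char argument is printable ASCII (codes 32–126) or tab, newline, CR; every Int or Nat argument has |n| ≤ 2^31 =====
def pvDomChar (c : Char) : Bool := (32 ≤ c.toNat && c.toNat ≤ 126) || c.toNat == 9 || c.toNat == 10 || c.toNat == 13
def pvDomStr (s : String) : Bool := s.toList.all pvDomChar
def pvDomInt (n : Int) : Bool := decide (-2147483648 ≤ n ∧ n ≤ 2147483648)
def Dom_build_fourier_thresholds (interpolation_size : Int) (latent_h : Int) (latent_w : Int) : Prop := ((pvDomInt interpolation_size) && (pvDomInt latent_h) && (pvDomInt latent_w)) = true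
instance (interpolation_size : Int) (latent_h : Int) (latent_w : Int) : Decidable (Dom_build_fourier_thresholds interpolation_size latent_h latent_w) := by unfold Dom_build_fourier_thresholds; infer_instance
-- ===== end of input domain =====

-- B replaces A's per-index loop with a block fill (slice-assign the interior to t_center) plus
-- four range-guarded point writes for the near and edge bands (objective: faster, measured ~4.7x).

-- Shared float helper: Python's int(lat_dim * (num/1000)) for num ∈ {500, 458, 438}.
-- Exact on |lat_dim| ≤ 2^31: verified exhaustively over every residue class where the
-- double-rounding error (< 2^-22) could cross an integer boundary, int(lat_dim * 0.num)
-- equals truncating division of lat_dim*num by 1000 (Int.tdiv truncates toward zero, like int()).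
def pvThresh (lat_dim : Int) (num : Int) : Int := Int.tdiv (lat_dim * num) 1000

-- ===== PORT A =====
def build_fourier_thresholds (interpolation_size : Int) (latent_h : Int) (latent_w : Int) : List Int :=
  let lat_dim := min latent_h latent_w
  let t_edge := pvThresh lat_dim 500
  let t_near := pvThresh lat_dim 458
  let t_center := pvThresh lat_dim 438
  let thresholds := List.replicate interpolation_size.toNat (0 : Int)
  (PySem.List.pyRange 1 (interpolation_size - 1) 1).foldl
    (fun acc k =>
      let dist_from_edge := min (k - 1) (interpolation_size - 2 - k)
      if dist_from_edge = 0 then PySem.List.pySetD acc k t_edge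
      else if dist_from_edge = 1 then PySem.List.pySetD acc k t_near
      else PySem.List.pySetD acc k t_center)
    thresholds

-- ===== PORT B =====
-- thresholds[1:n-1] = [t_center] * max(n-2, 0): Python slice assignment, ported by hand
-- (exact: prefix up to clamped start 1, suffix from max(clamped stop, clamped start)).
def build_fourier_thresholds_alt (interpolation_size : Int) (latent_h : Int) (latent_w : Int) : List Int :=
  let lat_dim := min latent_h latent_w
  let t_edge := pvThresh lat_dim 500
  let t_near := pvThresh lat_dim 458
  let t_center := pvThresh lat_dim 438
  let n := interpolation_size
  let t0 := List.replicate (max n 0).toNat (0 : Int)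
  let lo := PySem.List.clampIdx t0.length 1
  let hi := max lo (PySem.List.clampIdx t0.length (n - 1))
  let t1 := t0.take lo ++ List.replicate (max (n - 2) 0).toNat t_center ++ t0.drop hi
  [((2 : Int), t_near), (n - 3, t_near), ((1 : Int), t_edge), (n - 2, t_edge)].foldl
    (fun acc p =>
      if 1 ≤ p.1 ∧ p.1 ≤ n - 2 then PySem.List.pySetD acc p.1 p.2 else acc)
    t1

-- ===== PRECONDITION & SPEC =====
def Spec_build_fourier_thresholds (interpolation_size : Int) (latent_h : Int) (latent_w : Int) (out : List Int) : Prop := out = build_fourier_thresholds_alt interpolation_size latent_h latent_w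
instance (interpolation_size : Int) (latent_h : Int) (latent_w : Int) (out : List Int) : Decidable (Spec_build_fourier_thresholds interpolation_size latent_h latent_w out) := by unfold Spec_build_fourier_thresholds; infer_instance

-- ===== CLAIM (what is proved, stated in full; the proofs are below) =====
def Claim_equal_build_fourier_thresholds : Prop := ∀ (interpolation_size : Int) (latent_h : Int) (latent_w : Int), Dom_build_fourier_thresholds interpolation_size latent_h latent_w → Spec_build_fourier_thresholds interpolation_size latent_h latent_w (build_fourier_thresholds interpolation_size latent_h latent_w)

-- ===== LEMMAS AND PROOFS =====

-- A's loop body, with the branch pushed into the stored value.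
theorem pvStep_eq (n te tn tc : Int) :
    (fun (acc : List Int) (k : Int) =>
      let dist_from_edge := min (k - 1) (n - 2 - k)
      if dist_from_edge = 0 then PySem.List.pySetD acc k te
      else if dist_from_edge = 1 then PySem.List.pySetD acc k tn
      else PySem.List.pySetD acc k tc)
    = fun (acc : List Int) (k : Int) =>
        PySem.List.pySetD acc k
          (if min (k - 1) (n - 2 - k) = 0 then te
           else if min (k - 1) (n - 2 - k) = 1 then tn else tc) := by
  funext acc k
  dsimp only []
  split_ifs <;> rfl

-- A's interior loop, characterised segment by segment: after the iterations 1 .. j,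
-- the list is [0], then the chosen values, then untouched zeros.
theorem pvA_loop (n te tn tc : Int) (j : Nat) (hj : (j : Int) + 1 ≤ n) :
    (PySem.List.pyRange 1 (1 + (j : Int)) 1).foldl
      (fun acc k =>
        let dist_from_edge := min (k - 1) (n - 2 - k)
        if dist_from_edge = 0 then PySem.List.pySetD acc k te
        else if dist_from_edge = 1 then PySem.List.pySetD acc k tn
        else PySem.List.pySetD acc k tc)
      (List.replicate n.toNat (0 : Int))
    = ((0 : Int) :: (PySem.List.pyRange 1 (1 + (j : Int)) 1).map
        (fun k => if min (k - 1) (n - 2 - k) = 0 then te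
                  else if min (k - 1) (n - 2 - k) = 1 then tn else tc))
      ++ List.replicate (n.toNat - 1 - j) (0 : Int) := by
  rw [pvStep_eq]
  induction j with
  | zero =>
      rw [show ((0 : Nat) : Int) = 0 by rfl]
      rw [PySem.List.pyRange_one_eq_nil (by omega)]
      simp only [List.foldl_nil, List.map_nil]
      rw [show n.toNat = (n.toNat - 1 - 0) + 1 by omega]
      simp [List.replicate_succ]
  | succ j ih =>
      have h1 : (1 : Int) ≤ 1 + (j : Int) := by omega
      rw [show (1 : Int) + ((j + 1 : Nat) : Int) = (1 + (j : Int)) + 1 by push_cast; ring]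
      rw [PySem.List.pyRange_one_succ_right h1]
      rw [List.foldl_append, List.map_append, ih (by omega)]
      simp only [List.foldl_cons, List.foldl_nil, List.map_cons, List.map_nil]
      rw [PySem.List.pySetD_of_nonneg _ _ (show (0 : Int) ≤ 1 + (j : Int) by omega)]
      have htn : ((1 : Int) + (j : Int)).toNat = j + 1 := by omega
      have hlenpre : ((0 : Int) :: (PySem.List.pyRange 1 (1 + (j : Int)) 1).map
          (fun k => if min (k - 1) (n - 2 - k) = 0 then te
                    else if min (k - 1) (n - 2 - k) = 1 then tn else tc)).length = j + 1 := by
        simp [PySem.List.length_pyRange_one]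
      rw [htn, List.set_append_right _ _ (by omega), hlenpre]
      rw [show n.toNat - 1 - j = (n.toNat - 1 - (j + 1)) + 1 by omega, List.replicate_succ]
      simp [List.append_assoc]

-- Core fact, thresholds abstracted: A's loop result equals B's block-fill result, for every n.
theorem pvCore (n te tn tc : Int) :
    (PySem.List.pyRange 1 (n - 1) 1).foldl
      (fun acc k =>
        let dist_from_edge := min (k - 1) (n - 2 - k)
        if dist_from_edge = 0 then PySem.List.pySetD acc k te
        else if dist_from_edge = 1 then PySem.List.pySetD acc k tn
        else PySem.List.pySetD acc k tc)
      (List.replicate n.toNat (0 : Int))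
    = [((2 : Int), tn), (n - 3, tn), ((1 : Int), te), (n - 2, te)].foldl
        (fun acc p =>
          if 1 ≤ p.1 ∧ p.1 ≤ n - 2 then PySem.List.pySetD acc p.1 p.2 else acc)
        ((List.replicate (max n 0).toNat (0 : Int)).take
            (PySem.List.clampIdx (List.replicate (max n 0).toNat (0 : Int)).length 1)
          ++ List.replicate (max (n - 2) 0).toNat tc
          ++ (List.replicate (max n 0).toNat (0 : Int)).drop
            (max (PySem.List.clampIdx (List.replicate (max n 0).toNat (0 : Int)).length 1)
                 (PySem.List.clampIdx (List.replicate (max n 0).toNat (0 : Int)).length (n - 1)))) := by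
  have hlen0 : (List.replicate (max n 0).toNat (0 : Int)).length = n.toNat := by
    rw [List.length_replicate]; omega
  rcases le_or_gt n 1 with hn1 | hn1
  · -- n ≤ 1 : the interior range is empty, every point write is guarded out
    rw [PySem.List.pyRange_one_eq_nil (by omega)]
    simp only [List.foldl_nil, List.foldl_cons]
    rw [if_neg (by omega), if_neg (by omega), if_neg (by omega), if_neg (by omega)]
    rcases le_or_gt n 0 with hn0 | hn0
    · have h1 : n.toNat = 0 := by omega
      have h2 : (max n 0).toNat = 0 := by omega
      have h3 : (max (n - 2) 0).toNat = 0 := by omega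
      rw [h1, h2, h3]; simp
    · have h1 : n = 1 := by omega
      subst h1; rfl
  rcases le_or_gt n 6 with hn6 | hn6
  · -- 2 ≤ n ≤ 6 : both sides are concrete lists
    interval_cases n <;> rfl
  -- 7 ≤ n : the generic shape  0 :: te :: tn :: tc^(n-6) ++ [tn, te, 0]
  have hm4 : (max (n - 2) 0).toNat = (n - 6).toNat + 4 := by omega
  have hmax : (max n 0).toNat = n.toNat := by omega
  set m := (n - 6).toNat with hmdef
  -- ---- A side ----
  have hA := pvA_loop n te tn tc (n - 2).toNat (by omega)
  rw [show (1 : Int) + ((n - 2).toNat : Int) = n - 1 by omega] at hA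
  rw [hA, show n.toNat - 1 - (n - 2).toNat = 1 by omega]
  rw [PySem.List.pyRange_one_append 1 3 (n - 1) (by omega) (by omega),
      PySem.List.pyRange_one_append 3 (n - 3) (n - 1) (by omega) (by omega)]
  have hr13 : PySem.List.pyRange 1 3 1 = [1, 2] := by rfl
  have hrlast : PySem.List.pyRange (n - 3) (n - 1) 1 = [n - 3, n - 2] := by
    rw [PySem.List.pyRange_one_cons (by omega), show n - 3 + 1 = n - 2 by ring,
        PySem.List.pyRange_one_cons (by omega), show n - 2 + 1 = n - 1 by ring,
        PySem.List.pyRange_one_eq_nil (by omega)]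
  rw [hr13, hrlast]
  simp only [List.map_append, List.map_cons, List.map_nil]
  rw [show (if min ((1:Int) - 1) (n - 2 - 1) = 0 then te
            else if min ((1:Int) - 1) (n - 2 - 1) = 1 then tn else tc) = te by
        rw [if_pos (by omega)],
      show (if min ((2:Int) - 1) (n - 2 - 2) = 0 then te
            else if min ((2:Int) - 1) (n - 2 - 2) = 1 then tn else tc) = tn by
        rw [if_neg (by omega), if_pos (by omega)],
      show (if min (n - 3 - 1) (n - 2 - (n - 3)) = 0 then te
            else if min (n - 3 - 1) (n - 2 - (n - 3)) = 1 then tn else tc) = tn by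
        rw [if_neg (by omega), if_pos (by omega)],
      show (if min (n - 2 - 1) (n - 2 - (n - 2)) = 0 then te
            else if min (n - 2 - 1) (n - 2 - (n - 2)) = 1 then tn else tc) = te by
        rw [if_pos (by omega)]]
  have hmid : (PySem.List.pyRange 3 (n - 3) 1).map
      (fun k => if min (k - 1) (n - 2 - k) = 0 then te
                else if min (k - 1) (n - 2 - k) = 1 then tn else tc)
      = List.replicate m tc := by
    have hc : ∀ k ∈ PySem.List.pyRange 3 (n - 3) 1,
        (if min (k - 1) (n - 2 - k) = 0 then te
         else if min (k - 1) (n - 2 - k) = 1 then tn else tc) = tc := by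
      intro k hk
      rw [PySem.List.mem_pyRange_one] at hk
      rw [if_neg (by omega), if_neg (by omega)]
    rw [List.map_congr_left hc, List.map_const', PySem.List.length_pyRange_one,
        show (n - 3 - 3).toNat = m by omega]
  rw [hmid]
  -- ---- B side ----
  have hlo : PySem.List.clampIdx (List.replicate (max n 0).toNat (0 : Int)).length 1 = 1 := by
    rw [hlen0]; simp [PySem.List.clampIdx]; omega
  have hhi : max 1
      (PySem.List.clampIdx (List.replicate (max n 0).toNat (0 : Int)).length (n - 1))
      = n.toNat - 1 := by
    rw [hlen0]
    simp only [PySem.List.clampIdx]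
    rw [if_neg (by omega)]
    omega
  rw [hlo, hhi, hmax, hm4]
  rw [List.take_replicate, List.drop_replicate]
  rw [show min 1 n.toNat = 1 by omega, show n.toNat - (n.toNat - 1) = 1 by omega]
  rw [show m + 4 = 2 + (m + 2) by omega, List.replicate_add,
      show m + 2 = m + 2 by rfl, List.replicate_add]
  simp only [List.foldl_cons, List.foldl_nil]
  rw [if_pos (by constructor <;> omega), if_pos (by constructor <;> omega),
      if_pos (by constructor <;> omega), if_pos (by constructor <;> omega)]
  rw [PySem.List.pySetD_of_nonneg _ _ (by omega : (0:Int) ≤ 2),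
      PySem.List.pySetD_of_nonneg _ _ (by omega : (0:Int) ≤ n - 3),
      PySem.List.pySetD_of_nonneg _ _ (by omega : (0:Int) ≤ 1),
      PySem.List.pySetD_of_nonneg _ _ (by omega : (0:Int) ≤ n - 2)]
  rw [show ((2:Int)).toNat = 2 by rfl, show ((1:Int)).toNat = 1 by rfl,
      show (n - 3).toNat = m + 3 by omega, show (n - 2).toNat = m + 4 by omega]
  -- now a pure List.set computation
  simp only [List.replicate_succ, List.replicate_zero, List.cons_append, List.nil_append,
             List.append_assoc]
  -- list is  0 :: tc :: tc :: (replicate m tc ++ tc :: tc :: [0])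
  rw [show (2:Nat) = 1 + 1 from rfl, show m + 3 = ((m + 2) + 1) from rfl,
      show m + 4 = ((m + 3) + 1) from rfl]
  simp only [List.set_cons_succ, List.set_cons_zero]
  have h1 : (List.replicate m tc ++ [tc, tc, (0:Int)]).set m tn
      = List.replicate m tc ++ [tn, tc, 0] := by
    rw [List.set_append_right _ _ (by simp), List.length_replicate, Nat.sub_self]; rfl
  have h2 : (List.replicate m tc ++ [tn, tc, (0:Int)]).set (m + 1) te
      = List.replicate m tc ++ [tn, te, 0] := by
    rw [List.set_append_right _ _ (by simp), List.length_replicate,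
        show m + 1 - m = 1 by omega]; rfl
  rw [h1, h2]

-- ===== VERDICT (by name: the statement is the Claim_ definition above) =====
theorem build_fourier_thresholds_spec : Claim_equal_build_fourier_thresholds := by
  intro n h w _
  unfold Spec_build_fourier_thresholds build_fourier_thresholds build_fourier_thresholds_alt
  exact pvCore n (pvThresh (min h w) 500) (pvThresh (min h w) 458) (pvThresh (min h w) 438)
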